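-- pv_equiv track=rewrite | github.com/yvetteyuanqin/WarehouseMNGM | report4b/warehouseapp.py | matrixredu
-- ===== SOURCE A (Python) =====
-- def matrixredu(matrix):#both matrix and cost are returned
--     mincost=0
--     cost=0
--     k=0
--     matred=[]
--
--     # reduce by row
--     for row in matrix:
--         if len([i for i in row if i is not None])==0 or min(i for i in row if i is not None) == 0:
--             matred.append(row)
--         else:
--             matred.append([])
--             mincost = min(i for i in row if i is not None)
--             for ele in row:
--                 if ele != None:
--                     matred[k].append(ele-mincost)
--                 else:
--                     matred[k].append(None)
--             cost = cost +mincost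
--         k=k+1
--
--     #reduce by col
--     for i in range(len(matred[0])):
--         if 0 in [row[i] for row in matred]:
--             continue
--         else:
--             # if len([i for i in matred[i] if i is not None])!=0:
--             if len([n for n in [row[i] for row in matred] if n is not None])== 0 :#all col is none
--
--                 continue
--             else:
--                 mincost = min(n for n in [row[i] for row in matred] if n is not None)
--                 cost=cost + mincost
--                 for j in range(len(matred)):
--                     if matred[j][i]== None:
--                         continue
--                     matred[j][i] = matred[j][i]-mincost
--
--
--
--     return matred,cost
-- ===== SOURCE B (Python) =====
-- def matrixredu(matrix):
--     cost = 0
--     matred = []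
--
--     # row reduction: keep zero-min / all-None rows by reference, else append a reduced copy
--     for row in matrix:
--         vals = [x for x in row if x is not None]
--         if not vals or min(vals) == 0:
--             matred.append(row)
--         else:
--             m = min(vals)
--             cost += m
--             matred.append([x - m if x is not None else None for x in row])
--
--     # one sweep building per-column aggregates: (running min of non-None cells, has-zero flag)
--     ncols = len(matred[0])
--     agg = [(None, False)] * ncols
--     for row in matred:
--         agg = [(mn if x is None or (mn is not None and mn <= x) else x,
--                 hz or x == 0)
--                for (mn, hz), x in zip(agg, (row[i] for i in range(ncols)))]
--
--     # apply: for each column without a zero and with a non-None minimum, subtract it in place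
--     for i, (mn, hz) in enumerate(agg):
--         if mn is not None and not hz:
--             cost += mn
--             for j in range(len(matred)):
--                 if matred[j][i] is not None:
--                     matred[j][i] -= mn
--
--     return matred, cost
-- ===== Notes on version B (the rewrite author's own statement) =====
-- stated objective: alternative
-- what changed: The column phase is restructured from repeated per-column list-comprehension scans (one zero-test scan, one None-filter scan, one min scan per column) into a single row-major sweep that builds per-column (running-min, has-zero) aggregates, followed by one apply pass; the row phase builds reduced rows by comprehension instead of element-by-element appends.
import Mathlib
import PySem

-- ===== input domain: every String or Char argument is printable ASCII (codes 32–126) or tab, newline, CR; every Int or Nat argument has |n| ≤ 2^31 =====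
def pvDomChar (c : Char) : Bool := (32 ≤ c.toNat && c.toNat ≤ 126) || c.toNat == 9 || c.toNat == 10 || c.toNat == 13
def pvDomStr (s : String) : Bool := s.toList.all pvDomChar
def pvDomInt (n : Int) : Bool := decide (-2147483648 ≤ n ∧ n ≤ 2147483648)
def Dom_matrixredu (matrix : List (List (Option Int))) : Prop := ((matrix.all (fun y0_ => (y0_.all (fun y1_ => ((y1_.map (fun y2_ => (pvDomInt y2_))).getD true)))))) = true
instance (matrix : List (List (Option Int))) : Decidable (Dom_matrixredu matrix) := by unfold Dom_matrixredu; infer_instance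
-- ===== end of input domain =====

-- B restructures the column phase into one aggregate-building sweep plus one apply pass (objective: alternative).
-- Both Pythons mutate the input's rows identically in place; the equivalence proved here is about the returned value.

-- Python `row[i] : Option Int`; the `.getD none` only guards totality (Pre_ keeps every used index in range)
def pvCell (row : List (Option Int)) (i : Nat) : Option Int := (row[i]?).getD none

-- ===== PORT A =====
-- the inner `for ele in row` append-loop building matred[k]
def pvReduceRowA (row : List (Option Int)) (m : Int) : List (Option Int) :=
  row.foldl (fun r e => r ++ [match e with | some v => some (v - m) | none => none]) []

-- one iteration of `for row in matrix` (min over the generator; Python's short-circuit `or` becomes the match/if nesting)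
def pvRowStepA (acc : List (List (Option Int)) × Int) (row : List (Option Int)) :
    List (List (Option Int)) × Int :=
  match (row.filterMap id).min? with
  | none => (acc.1 ++ [row], acc.2)
  | some m => if m = 0 then (acc.1 ++ [row], acc.2)
              else (acc.1 ++ [pvReduceRowA row m], acc.2 + m)

-- `if matred[j][i] == None: continue; matred[j][i] -= mincost` for one row
def pvSetCellA (row : List (Option Int)) (i : Nat) (m : Int) : List (Option Int) :=
  match row[i]? with
  | some (some v) => row.set i (some (v - m))
  | _ => row

-- one iteration of `for i in range(len(matred[0]))`
def pvColStepA (st : List (List (Option Int)) × Int) (i : Nat) :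
    List (List (Option Int)) × Int :=
  let col := st.1.map (fun row => pvCell row i)
  if col.contains (some 0) then st
  else match (col.filterMap id).min? with
    | none => st
    | some m => (st.1.map (fun row => pvSetCellA row i m), st.2 + m)

def matrixredu (matrix : List (List (Option Int))) : List (List (Option Int)) × Int :=
  let r := matrix.foldl pvRowStepA ([], 0)
  (List.range (r.1.headD []).length).foldl pvColStepA r

-- ===== PORT B =====
-- one iteration of B's row loop (the reduced row is built by comprehension = map)
def pvRowStepB (acc : List (List (Option Int)) × Int) (row : List (Option Int)) :
    List (List (Option Int)) × Int :=
  match (row.filterMap id).min? with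
  | none => (acc.1 ++ [row], acc.2)
  | some m => if m = 0 then (acc.1 ++ [row], acc.2)
              else (acc.1 ++ [row.map (Option.map (· - m))], acc.2 + m)

-- combine one cell into a column aggregate (running min of non-None cells, has-zero flag)
def pvAggStep (p : (Option Int × Bool) × Option Int) : Option Int × Bool :=
  ((match p.2, p.1.1 with
    | none, mn => mn
    | some v, none => some v
    | some v, some m => if m ≤ v then some m else some v),
   p.1.2 || (p.2 == some 0))

-- the aggregate-updating comprehension `[... for (mn,hz), x in zip(agg, (row[i] for i in range(ncols)))]`
def pvSweepB (agg : List (Option Int × Bool)) (row : List (Option Int)) (ncols : Nat) :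
    List (Option Int × Bool) :=
  (List.zip agg ((List.range ncols).map (fun i => pvCell row i))).map pvAggStep

def pvSetCellB (row : List (Option Int)) (i : Nat) (m : Int) : List (Option Int) :=
  match pvCell row i with
  | some v => row.set i (some (v - m))
  | none => row

-- one iteration of `for i, (mn, hz) in enumerate(agg)`
def pvApplyB (st : List (List (Option Int)) × Int) (p : (Option Int × Bool) × Nat) :
    List (List (Option Int)) × Int :=
  match p.1.1, p.1.2 with
  | some m, false => (st.1.map (fun row => pvSetCellB row p.2 m), st.2 + m)
  | _, _ => st

def matrixredu_alt (matrix : List (List (Option Int))) : List (List (Option Int)) × Int :=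
  let r := matrix.foldl pvRowStepB ([], 0)
  let ncols := (r.1.headD []).length
  let agg := r.1.foldl (fun agg row => pvSweepB agg row ncols)
               (List.replicate ncols ((none : Option Int), false))
  agg.zipIdx.foldl pvApplyB r

-- ===== PRECONDITION & SPEC =====
-- Pre_ excludes exactly the inputs where Python A raises an IndexError: the empty matrix (matrix[0])
-- and matrices in which some row is shorter than row 0 (row[i] in the column phase).
def Pre_matrixredu (matrix : List (List (Option Int))) : Prop :=
  matrix ≠ [] ∧ ∀ row ∈ matrix, (matrix.headD []).length ≤ row.length
instance (matrix : List (List (Option Int))) : Decidable (Pre_matrixredu matrix) := by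
  unfold Pre_matrixredu; infer_instance
def pvWitness_matrixredu : List (List (Option Int)) :=
  [[some 3, some 1], [some 4, none]]
def Spec_matrixredu (matrix : List (List (Option Int))) (out : List (List (Option Int)) × Int) : Prop := out = matrixredu_alt matrix
instance (matrix : List (List (Option Int))) (out : List (List (Option Int)) × Int) : Decidable (Spec_matrixredu matrix out) := by unfold Spec_matrixredu; infer_instance

-- ===== CLAIM (what is proved, stated in full; the proofs are below) =====
def Claim_equal_matrixredu : Prop := ∀ (matrix : List (List (Option Int))), Dom_matrixredu matrix → Pre_matrixredu matrix → Spec_matrixredu matrix (matrixredu matrix)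

-- ===== LEMMAS AND PROOFS =====

-- min with `none` as identity; the value pvAggStep's running minimum accumulates
def pvOmin : Option Int → Option Int → Option Int
  | none, b => b
  | a, none => a
  | some a, some b => some (min a b)

-- the column aggregate of one whole column
def pvColAgg (xs : List (Option Int)) : Option Int × Bool :=
  xs.foldl (fun a x => pvAggStep (a, x)) (none, false)

theorem pvReduceRowA_eq (row : List (Option Int)) (m : Int) :
    pvReduceRowA row m = row.map (Option.map (· - m)) := by
  unfold pvReduceRowA
  rw [PySem.List.foldl_append_singleton_eq_map]
  simp only [List.nil_append]
  congr 1; funext e; cases e <;> rfl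

theorem pvRowStep_eq : pvRowStepA = pvRowStepB := by
  funext acc row
  unfold pvRowStepA pvRowStepB
  cases (row.filterMap id).min? with
  | none => rfl
  | some m => dsimp only; rw [pvReduceRowA_eq]

theorem pvSetCell_eq : pvSetCellB = pvSetCellA := by
  funext row i m
  unfold pvSetCellB pvSetCellA pvCell
  cases h : row[i]? with
  | none => simp
  | some o => cases o <;> simp

theorem pvCell_set_ne (row : List (Option Int)) (i j : Nat) (m : Int) (h : j ≠ i) :
    pvCell (pvSetCellA row i m) j = pvCell row j := by
  unfold pvSetCellA pvCell
  cases hr : row[i]? with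
  | none => rfl
  | some o => cases o with
    | none => rfl
    | some v => simp [List.getElem?_set_ne (Ne.symm h)]

theorem pvOmin_assoc (a b c : Option Int) : pvOmin (pvOmin a b) c = pvOmin a (pvOmin b c) := by
  cases a <;> cases b <;> cases c <;> simp [pvOmin, min_assoc]

theorem pv_foldl_min (l : List Int) : ∀ a b : Int, l.foldl min (min a b) = min a (l.foldl min b) := by
  induction l with
  | nil => intro a b; rfl
  | cons c l ih =>
    intro a b
    simp only [List.foldl_cons]
    rw [min_assoc, ih]

theorem pv_min?_cons (v : Int) (l : List Int) :
    (v :: l).min? = pvOmin (some v) l.min? := by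
  cases l with
  | nil => rfl
  | cons w l =>
    rw [List.min?_cons', List.min?_cons']
    simp only [pvOmin, List.foldl_cons]
    rw [pv_foldl_min]

theorem pvAgg_fold (xs : List (Option Int)) : ∀ (mn : Option Int) (hz : Bool),
    xs.foldl (fun a x => pvAggStep (a, x)) (mn, hz)
      = (pvOmin mn (xs.filterMap id).min?, hz || xs.contains (some 0)) := by
  induction xs with
  | nil => intro mn hz; cases mn <;> simp [pvOmin]
  | cons x xs ih =>
    intro mn hz
    simp only [List.foldl_cons]
    rw [ih]
    cases x with
    | none =>
      simp only [pvAggStep, List.filterMap_cons_none]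
      simp
    | some v =>
      have hf : List.filterMap id (some v :: xs) = v :: List.filterMap id xs := rfl
      simp only [pvAggStep, hf]
      rw [pv_min?_cons, ← pvOmin_assoc]
      have h1 : pvOmin mn (some v) =
          (match some v, mn with
           | none, mn => mn
           | some v, none => some v
           | some v, some m => if m ≤ v then some m else some v) := by
        cases mn with
        | none => rfl
        | some m =>
          simp only [pvOmin, min_def, apply_ite]
          split_ifs <;> rfl
      rw [← h1]
      simp only [Bool.or_assoc]
      congr 2
      rcases eq_or_ne v 0 with hv | hv
      · subst hv; rfl
      · simp [hv, Ne.symm hv]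

theorem pvColAgg_eq (xs : List (Option Int)) :
    pvColAgg xs = ((xs.filterMap id).min?, xs.contains (some 0)) := by
  unfold pvColAgg
  rw [pvAgg_fold]
  cases (xs.filterMap id).min? <;> simp [pvOmin]

theorem pvSweep_map_range (n : Nat) (F : Nat → Option Int × Bool) (row : List (Option Int)) :
    pvSweepB ((List.range n).map F) row n
      = (List.range n).map (fun i => pvAggStep (F i, pvCell row i)) := by
  unfold pvSweepB
  rw [List.zip_map', List.map_map]
  rfl

theorem pvAggFold_closed (M : List (List (Option Int))) : ∀ (n : Nat) (F : Nat → Option Int × Bool),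
    M.foldl (fun agg row => pvSweepB agg row n) ((List.range n).map F)
      = (List.range n).map (fun i =>
          (M.map (fun row => pvCell row i)).foldl (fun a x => pvAggStep (a, x)) (F i)) := by
  induction M with
  | nil => intro n F; simp
  | cons row M ih =>
    intro n F
    simp only [List.foldl_cons, List.map_cons]
    rw [pvSweep_map_range, ih]

theorem pvZipIdx_map_range {α : Type} (n : Nat) (F : Nat → α) :
    ((List.range n).map F).zipIdx = (List.range n).map (fun i => (F i, i)) := by
  apply List.ext_getElem?
  intro i
  simp only [List.getElem?_zipIdx, List.getElem?_map]
  by_cases h : i < n <;> simp [h]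

-- A's column step, on a state whose columns are the given ones, is B's apply step with the precomputed aggregate
theorem pvColStep_agg (st : List (List (Option Int)) × Int) (i : Nat) :
    pvColStepA st i = pvApplyB st (pvColAgg (st.1.map (fun row => pvCell row i)), i) := by
  unfold pvColStepA pvApplyB
  rw [pvColAgg_eq]
  by_cases hz : (st.1.map (fun row => pvCell row i)).contains (some 0)
  · simp only [hz, if_true]
    cases ((st.1.map (fun row => pvCell row i)).filterMap id).min? <;> rfl
  · simp only [hz, if_false, Bool.false_eq_true]
    cases ((st.1.map (fun row => pvCell row i)).filterMap id).min? with
    | none => rfl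
    | some m => simp [pvSetCell_eq]

-- the interleaving argument: an update at column i never changes any other column, so A's
-- fold over distinct indices with stats read from the CURRENT matrix equals B's fold with
-- all stats precomputed from the INITIAL matrix
theorem pvColPhase (l : List Nat) : l.Nodup →
    ∀ (st : List (List (Option Int)) × Int) (M0 : List (List (Option Int))),
    (∀ i ∈ l, st.1.map (fun row => pvCell row i) = M0.map (fun row => pvCell row i)) →
    l.foldl pvColStepA st
      = l.foldl (fun s i => pvApplyB s (pvColAgg (M0.map (fun row => pvCell row i)), i)) st := by
  induction l with
  | nil => intro _ st M0 _; rfl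
  | cons i rest ih =>
    intro hnd st M0 hcols
    obtain ⟨hi, hrest⟩ := List.nodup_cons.mp hnd
    have hci := hcols i (List.mem_cons_self ..)
    simp only [List.foldl_cons]
    rw [pvColStep_agg, hci]
    apply ih hrest
    intro j hj
    have hji : j ≠ i := fun h => hi (h ▸ hj)
    rcases hP : pvColAgg (M0.map (fun row => pvCell row i)) with ⟨mn, hzb⟩
    have hgoal : (pvApplyB st ((mn, hzb), i)).1.map (fun row => pvCell row j)
        = st.1.map (fun row => pvCell row j) := by
      cases mn with
      | none => cases hzb <;> rfl
      | some m =>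
        cases hzb with
        | true => rfl
        | false =>
          unfold pvApplyB
          simp only [List.map_map]
          apply List.map_congr_left
          intro row _
          simp only [Function.comp_apply]
          rw [pvSetCell_eq]
          exact pvCell_set_ne _ _ _ _ hji
    rw [hgoal]
    exact hcols j (List.mem_cons_of_mem _ hj)

theorem pv_main (matrix : List (List (Option Int))) :
    matrixredu matrix = matrixredu_alt matrix := by
  unfold matrixredu matrixredu_alt
  rw [pvRowStep_eq]
  set r := matrix.foldl pvRowStepB ([], 0) with hr
  set n := (r.1.headD []).length with hn
  show (List.range n).foldl pvColStepA r
      = ((r.1.foldl (fun agg row => pvSweepB agg row n) (List.replicate n ((none : Option Int), false))).zipIdx).foldl pvApplyB r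
  have hrep : List.replicate n ((none : Option Int), false)
      = (List.range n).map (fun _ => ((none : Option Int), false)) := by
    rw [List.map_const', List.length_range]
  rw [hrep, pvAggFold_closed]
  have hagg : (List.range n).map (fun i =>
        (r.1.map (fun row => pvCell row i)).foldl (fun a x => pvAggStep (a, x)) ((none : Option Int), false))
      = (List.range n).map (fun i => pvColAgg (r.1.map (fun row => pvCell row i))) := rfl
  rw [hagg, pvZipIdx_map_range, List.foldl_map]
  exact pvColPhase (List.range n) (List.nodup_range) r r.1 (fun i _ => rfl)

-- ===== VERDICT (by name: the statement is the Claim_ definition above) =====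
theorem matrixredu_spec : Claim_equal_matrixredu := by
  intro matrix _ _
  unfold Spec_matrixredu
  exact pv_main matrix
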